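-- pv_equiv track=rewrite | github.com/YodaEmbedding/experiments | bf/bf.py | init_jump_stack
-- ===== SOURCE A (Python) =====
-- def init_jump_stack(program):
--     jmp_stack = {}
--     unmatched = []
--     for i, c in enumerate(program):
--         if c == '[':
--             unmatched.append(i)
--         elif c == ']':
--             a, b = unmatched.pop(), i
--             jmp_stack[a] = b
--             jmp_stack[b] = a
--     return jmp_stack
-- ===== SOURCE B (Python) =====
-- def init_jump_stack(program):
--     jmp_stack = {}
--     for i, c in enumerate(program):
--         if c == ']':
--             balance = 0
--             for j in range(i - 1, -1, -1):
--                 if program[j] == '[':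
--                     if balance == 0:
--                         break
--                     balance -= 1
--                 elif program[j] == ']':
--                     balance += 1
--             else:
--                 raise IndexError("unmatched ']'")
--             jmp_stack[j] = i
--             jmp_stack[i] = j
--     return jmp_stack
-- ===== Notes on version B (the rewrite author's own statement) =====
-- stated objective: alternative
-- what changed: Replaces the single stack-based pass with a per-']' leftward balance-counter scan that recomputes each matching '[' independently, maintaining no stack.
import Mathlib
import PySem

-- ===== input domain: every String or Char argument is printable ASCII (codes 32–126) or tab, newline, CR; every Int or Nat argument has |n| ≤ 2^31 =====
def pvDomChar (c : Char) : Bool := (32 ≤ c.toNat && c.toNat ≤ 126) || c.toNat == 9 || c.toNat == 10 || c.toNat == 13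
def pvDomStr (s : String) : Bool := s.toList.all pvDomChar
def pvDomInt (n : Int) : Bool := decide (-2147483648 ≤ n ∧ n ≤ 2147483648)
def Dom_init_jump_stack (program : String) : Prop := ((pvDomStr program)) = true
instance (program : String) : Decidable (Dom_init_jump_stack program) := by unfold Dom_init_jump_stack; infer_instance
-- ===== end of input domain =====

-- B replaces A's single stack-based pass by an independent leftward balance-counter scan
-- for every ']' (objective: alternative decomposition, not faster).

-- ===== PORT A =====
-- helper: list(enumerate(program)) with Nat positions (Python positions are ≥ 0); cast to Int at insertion
def enumFrom (n : Nat) : List Char → List (Nat × Char)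
  | [] => []
  | c :: cs => (n, c) :: enumFrom (n + 1) cs

-- A's for-loop; `s` is Python's `unmatched` with head = top (list append/pop at the end);
-- `none` is exactly the IndexError of `unmatched.pop()` on an empty list (excluded by Pre_)
def loopA : List (Nat × Char) → PySem.Dict Int Int → List Nat → Option (PySem.Dict Int Int × List Nat)
  | [], d, s => some (d, s)
  | (i, c) :: rest, d, s =>
    if c = '[' then loopA rest d (i :: s)
    else if c = ']' then
      match s with
      | [] => none
      | a :: t => loopA rest ((d.insert (a : Int) (i : Int)).insert (i : Int) (a : Int)) t
    else loopA rest d s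

def init_jump_stack (program : String) : List (Int × Int) :=
  match loopA (enumFrom 0 program.toList) PySem.Dict.empty [] with
  | some (d, _) => d.items
  | none => []

-- ===== PORT B =====
-- B's inner scan `for j in range(i-1, -1, -1)`; `none` = scan exhausted (B raises IndexError)
def findOpen (cs : List Char) (j : Nat) (bal : Nat) : Option Nat :=
  if cs[j]?.getD ' ' = '[' then
    (if bal = 0 then some j else (if h : j = 0 then none else findOpen cs (j - 1) (bal - 1)))
  else if cs[j]?.getD ' ' = ']' then
    (if h : j = 0 then none else findOpen cs (j - 1) (bal + 1))
  else (if h : j = 0 then none else findOpen cs (j - 1) bal)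
  termination_by j
  decreasing_by all_goals omega

-- B's outer for-loop; for ']' at position 0 the range is empty and B raises (none)
def loopB (cs : List Char) : List (Nat × Char) → PySem.Dict Int Int → Option (PySem.Dict Int Int)
  | [], d => some d
  | (i, c) :: rest, d =>
    if c = ']' then
      if h : i = 0 then none
      else
        match findOpen cs (i - 1) 0 with
        | none => none
        | some a => loopB cs rest ((d.insert (a : Int) (i : Int)).insert (i : Int) (a : Int))
    else loopB cs rest d

def init_jump_stack_alt (program : String) : List (Int × Int) :=
  match loopB program.toList (enumFrom 0 program.toList) PySem.Dict.empty with
  | some d => d.items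
  | none => []

-- ===== PRECONDITION & SPEC =====
-- Pre_ excludes exactly the inputs where A's `unmatched.pop()` raises IndexError:
-- programs with some prefix containing more ']' than '[' (unmatched closing bracket).
def Pre_init_jump_stack (program : String) : Prop :=
  ∀ n ∈ List.range (program.toList.length + 1),
    (program.toList.take n).count ']' ≤ (program.toList.take n).count '['
instance (program : String) : Decidable (Pre_init_jump_stack program) := by
  unfold Pre_init_jump_stack; infer_instance

def pvWitness_init_jump_stack : String := "+[>[-]<]["

def Spec_init_jump_stack (program : String) (out : List (Int × Int)) : Prop := out = init_jump_stack_alt program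
instance (program : String) (out : List (Int × Int)) : Decidable (Spec_init_jump_stack program out) := by unfold Spec_init_jump_stack; infer_instance

-- ===== CLAIM (what is proved, stated in full; the proofs are below) =====
def Claim_equal_init_jump_stack : Prop := ∀ (program : String), Dom_init_jump_stack program → Pre_init_jump_stack program → Spec_init_jump_stack program (init_jump_stack program)

-- ===== LEMMAS AND PROOFS =====

-- reference stack evolution (proof-side only): A's `unmatched` stack, positions kept
def stackOf : List (Nat × Char) → List Nat → Option (List Nat)
  | [], s => some s
  | (i, c) :: rest, s =>
    if c = '[' then stackOf rest (i :: s)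
    else if c = ']' then
      match s with
      | [] => none
      | _ :: t => stackOf rest t
    else stackOf rest s

-- backward balance scan over a reversed prefix (B's inner loop, list form)
def scanBack : List (Nat × Char) → Nat → Option Nat
  | [], _ => none
  | (i, c) :: rest, bal =>
    if c = '[' then (if bal = 0 then some i else scanBack rest (bal - 1))
    else if c = ']' then scanBack rest (bal + 1)
    else scanBack rest bal

theorem enumFrom_take (cs : List Char) : ∀ n k, (enumFrom n cs).take k = enumFrom n (cs.take k) := by
  induction cs with
  | nil => intro n k; simp [enumFrom]
  | cons c cs ih =>
    intro n k
    cases k with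
    | zero => simp [enumFrom]
    | succ k => simp [enumFrom, ih]

theorem enumFrom_append (a b : List Char) : ∀ n, enumFrom n (a ++ b) = enumFrom n a ++ enumFrom (n + a.length) b := by
  induction a with
  | nil => intro n; simp [enumFrom]
  | cons c cs ih =>
    intro n
    simp [enumFrom, ih (n + 1)]
    ring_nf

theorem enum_take_succ (cs : List Char) (k : Nat) (h : k < cs.length) :
    (enumFrom 0 cs).take (k + 1) = (enumFrom 0 cs).take k ++ [(k, cs[k])] := by
  rw [enumFrom_take, enumFrom_take]
  rw [List.take_succ, List.getElem?_eq_getElem h]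
  rw [enumFrom_append]
  simp [enumFrom, List.length_take, Nat.min_eq_left (Nat.le_of_lt h)]

theorem stackOf_append (l₁ l₂ : List (Nat × Char)) : ∀ s,
    stackOf (l₁ ++ l₂) s = (stackOf l₁ s).bind (fun s' => stackOf l₂ s') := by
  induction l₁ with
  | nil => intro s; simp [stackOf]
  | cons x rest ih =>
    intro s
    obtain ⟨i, c⟩ := x
    by_cases h1 : c = '['
    · simp [stackOf, h1, ih]
    · by_cases h2 : c = ']'
      · cases s with
        | nil => simp [stackOf, h1, h2]
        | cons a t => simp [stackOf, h1, h2, ih]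
      · simp [stackOf, h1, h2, ih]

theorem loopA_append (l₁ l₂ : List (Nat × Char)) : ∀ d s,
    loopA (l₁ ++ l₂) d s = (loopA l₁ d s).bind (fun p => loopA l₂ p.1 p.2) := by
  induction l₁ with
  | nil => intro d s; simp [loopA]
  | cons x rest ih =>
    intro d s
    obtain ⟨i, c⟩ := x
    by_cases h1 : c = '['
    · simp [loopA, h1, ih]
    · by_cases h2 : c = ']'
      · cases s with
        | nil => simp [loopA, h1, h2]
        | cons a t => simp [loopA, h1, h2, ih]
      · simp [loopA, h1, h2, ih]

theorem loopB_append (cs : List Char) (l₁ l₂ : List (Nat × Char)) : ∀ d,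
    loopB cs (l₁ ++ l₂) d = (loopB cs l₁ d).bind (fun d' => loopB cs l₂ d') := by
  induction l₁ with
  | nil => intro d; simp [loopB]
  | cons x rest ih =>
    intro d
    obtain ⟨i, c⟩ := x
    by_cases h2 : c = ']'
    · by_cases h0 : i = 0
      · simp [loopB, h2, h0]
      · cases hf : findOpen cs (i - 1) 0 with
        | none => simp [loopB, h2, h0, hf]
        | some a => simp [loopB, h2, h0, hf, ih]
    · simp [loopB, h2, ih]

-- the leftward balance scan reads A's stack: position `bal` from the top
theorem scan_stack (l : List (Nat × Char)) : ∀ s', stackOf l [] = some s' →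
    ∀ bal, scanBack l.reverse bal = (s'.drop bal).head? := by
  induction l using List.reverseRecOn with
  | nil =>
    intro s' h bal
    simp [stackOf] at h
    subst h
    simp [scanBack]
  | append_singleton l' x ih =>
    intro s' h bal
    obtain ⟨i, c⟩ := x
    rw [stackOf_append] at h
    cases hl : stackOf l' [] with
    | none => rw [hl] at h; simp at h
    | some s'' =>
      rw [hl] at h
      simp at h
      by_cases h1 : c = '['
      · simp [stackOf, h1] at h
        subst h
        rw [List.reverse_append]
        simp [scanBack, h1]
        by_cases hb : bal = 0
        · simp [hb]
        · obtain ⟨b', rfl⟩ : ∃ b', bal = b' + 1 := ⟨bal - 1, by omega⟩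
          simp [ih s'' hl b']
      · by_cases h2 : c = ']'
        · cases s'' with
          | nil => simp [stackOf, h1, h2] at h
          | cons a t =>
            simp [stackOf, h1, h2] at h
            subst h
            rw [List.reverse_append]
            simp [scanBack, h1, h2, ih (a :: t) hl (bal + 1)]
        · simp [stackOf, h1, h2] at h
          subst h
          rw [List.reverse_append]
          simp [scanBack, h1, h2, ih s'' hl bal]

-- B's indexed scan equals the list-form backward scan over the prefix
theorem findOpen_eq (cs : List Char) : ∀ j, j < cs.length → ∀ bal,
    findOpen cs j bal = scanBack (((enumFrom 0 cs).take (j + 1)).reverse) bal := by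
  intro j
  induction j with
  | zero =>
    intro h bal
    rw [enum_take_succ cs 0 h]
    rw [findOpen, List.getElem?_eq_getElem h]
    by_cases h1 : cs[0] = '['
    · simp [h1, scanBack]
    · by_cases h2 : cs[0] = ']'
      · simp [h1, h2, scanBack]
      · simp [h1, h2, scanBack]
  | succ j ih =>
    intro h bal
    have hj : j < cs.length := Nat.lt_of_succ_lt h
    rw [enum_take_succ cs (j + 1) h, List.reverse_append]
    rw [findOpen, List.getElem?_eq_getElem h]
    by_cases h1 : cs[j + 1] = '['
    · by_cases hb : bal = 0
      · simp [h1, hb, scanBack]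
      · simp [h1, hb, scanBack, ih hj (bal - 1)]
    · by_cases h2 : cs[j + 1] = ']'
      · simp [h1, h2, scanBack, ih hj (bal + 1)]
      · simp [h1, h2, scanBack, ih hj bal]

-- parallel simulation: B's loop and the reference stack both read off A's loop
theorem main_sim (cs : List Char) : ∀ k, k ≤ cs.length →
    loopB cs ((enumFrom 0 cs).take k) PySem.Dict.empty
      = (loopA ((enumFrom 0 cs).take k) PySem.Dict.empty []).map Prod.fst
    ∧ stackOf ((enumFrom 0 cs).take k) []
      = (loopA ((enumFrom 0 cs).take k) PySem.Dict.empty []).map Prod.snd := by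
  intro k
  induction k with
  | zero => intro _; simp [loopA, loopB, stackOf]
  | succ k ih =>
    intro hk
    have hklt : k < cs.length := hk
    obtain ⟨hB, hS⟩ := ih (Nat.le_of_lt hklt)
    rw [enum_take_succ cs k hklt]
    rw [loopA_append, loopB_append, stackOf_append]
    cases hA : loopA ((enumFrom 0 cs).take k) PySem.Dict.empty [] with
    | none =>
      rw [hA] at hB hS
      simp at hB hS
      rw [hB, hS]
      simp
    | some p =>
      obtain ⟨d, s⟩ := p
      rw [hA] at hB hS
      simp at hB hS
      rw [hB, hS]
      simp only [Option.bind_some]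
      set c := cs[k] with hc
      by_cases h1 : c = '['
      · simp [loopA, loopB, stackOf, h1]
      · by_cases h2 : c = ']'
        · cases s with
          | nil =>
            -- A raises: B's scan must fail too
            simp only [loopA, h1, h2, if_neg, if_pos]
            by_cases h0 : k = 0
            · simp [loopB, stackOf, h1, h2, h0]
            · have hscan : findOpen cs (k - 1) 0 = none := by
                have hlt : k - 1 < cs.length := by omega
                rw [findOpen_eq cs (k - 1) hlt 0]
                have : k - 1 + 1 = k := by omega
                rw [this]
                rw [scan_stack ((enumFrom 0 cs).take k) [] hS 0]
                simp
              simp [loopB, stackOf, h1, h2, h0, hscan]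
          | cons a t =>
            have h0 : k ≠ 0 := by
              intro h0
              subst h0
              simp [stackOf] at hS
            have hscan : findOpen cs (k - 1) 0 = some a := by
              have hlt : k - 1 < cs.length := by omega
              rw [findOpen_eq cs (k - 1) hlt 0]
              have : k - 1 + 1 = k := by omega
              rw [this]
              rw [scan_stack ((enumFrom 0 cs).take k) (a :: t) hS 0]
              simp
            simp [loopA, loopB, stackOf, h1, h2, h0, hscan]
        · simp [loopA, loopB, stackOf, h1, h2]

-- under the prefix-balance precondition A's stack never underflows
theorem stack_success (cs : List Char)
    (hpre : ∀ n ∈ List.range (cs.length + 1), (cs.take n).count ']' ≤ (cs.take n).count '[') :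
    ∀ k, k ≤ cs.length → ∃ s, stackOf ((enumFrom 0 cs).take k) [] = some s ∧
      s.length + (cs.take k).count ']' = (cs.take k).count '[' := by
  intro k
  induction k with
  | zero => intro _; exact ⟨[], by simp [stackOf], by simp⟩
  | succ k ih =>
    intro hk
    have hklt : k < cs.length := hk
    obtain ⟨s, hs, hlen⟩ := ih (Nat.le_of_lt hklt)
    rw [enum_take_succ cs k hklt, stackOf_append, hs]
    have htake : cs.take (k + 1) = cs.take k ++ [cs[k]] := by
      rw [List.take_succ, List.getElem?_eq_getElem hklt]
      simp
    by_cases h1 : cs[k] = '['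
    · have hc1 : (cs.take (k + 1)).count ']' = (cs.take k).count ']' := by
        rw [htake, List.count_append]; simp [h1]
      have hc2 : (cs.take (k + 1)).count '[' = (cs.take k).count '[' + 1 := by
        rw [htake, List.count_append]; simp [h1]
      exact ⟨k :: s, by simp [stackOf, h1], by rw [hc1, hc2]; simp; omega⟩
    · by_cases h2 : cs[k] = ']'
      · have hc1 : (cs.take (k + 1)).count ']' = (cs.take k).count ']' + 1 := by
          rw [htake, List.count_append]; simp [h2]
        have hc2 : (cs.take (k + 1)).count '[' = (cs.take k).count '[' := by
          rw [htake, List.count_append]; simp [h2]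
        have hcnt := hpre (k + 1) (by simp; omega)
        rw [hc1, hc2] at hcnt
        cases s with
        | nil => simp at hlen; omega
        | cons a t =>
          refine ⟨t, by simp [stackOf, h1, h2], ?_⟩
          rw [hc1, hc2]
          simp at hlen ⊢
          omega
      · have hc1 : (cs.take (k + 1)).count ']' = (cs.take k).count ']' := by
          rw [htake, List.count_append]; simp [h2]
        have hc2 : (cs.take (k + 1)).count '[' = (cs.take k).count '[' := by
          rw [htake, List.count_append]; simp [h1]
        exact ⟨s, by simp [stackOf, h1, h2], by rw [hc1, hc2]; exact hlen⟩

-- A's loop fails exactly when the reference stack does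
theorem loopA_none_iff (l : List (Nat × Char)) : ∀ d s,
    loopA l d s = none ↔ stackOf l s = none := by
  induction l with
  | nil => intro d s; simp [loopA, stackOf]
  | cons x rest ih =>
    intro d s
    obtain ⟨i, c⟩ := x
    by_cases h1 : c = '['
    · simp [loopA, stackOf, h1, ih]
    · by_cases h2 : c = ']'
      · cases s with
        | nil => simp [loopA, stackOf, h1, h2]
        | cons a t => simp [loopA, stackOf, h1, h2, ih]
      · simp [loopA, stackOf, h1, h2, ih]

-- ===== VERDICT (by name: the statement is the Claim_ definition above) =====
theorem init_jump_stack_spec : Claim_equal_init_jump_stack := by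
  intro program _ hpre
  unfold Spec_init_jump_stack
  unfold Pre_init_jump_stack at hpre
  set cs := program.toList with hcs
  have hfull : (enumFrom 0 cs).take cs.length = enumFrom 0 cs := by
    rw [enumFrom_take, List.take_length]
  obtain ⟨s, hs, _⟩ := stack_success cs hpre cs.length (le_refl _)
  obtain ⟨hB, hS⟩ := main_sim cs cs.length (le_refl _)
  rw [hfull] at hs hB hS
  cases hA : loopA (enumFrom 0 cs) PySem.Dict.empty [] with
  | none =>
    rw [loopA_none_iff] at hA
    rw [hA] at hs
    exact absurd hs (by simp)
  | some p =>
    obtain ⟨d, s'⟩ := p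
    rw [hA] at hB
    simp at hB
    unfold init_jump_stack init_jump_stack_alt
    rw [← hcs, hA, hB]
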